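-- pv_equiv track=rewrite | github.com/Yash24-ctrl/UrBridge.ai | security/encryption.py | anonymize_resume_data
-- ===== SOURCE A (Python) =====
-- def anonymize_resume_data(resume_data):
--     """Anonymize resume data by removing PII as per Data Minimization Policy"""
--     if not resume_data or not isinstance(resume_data, dict):
--         return resume_data
--
--     anonymized_data = resume_data.copy()
--
--     # Remove PII fields that should not be stored
--     pii_fields = ['name', 'email', 'phone', 'address', 'personal_info']
--     for field in pii_fields:
--         if field in anonymized_data:
--             del anonymized_data[field]
--
--     return anonymized_data
-- ===== SOURCE B (Python) =====
-- PII_FIELDS = {'name', 'email', 'phone', 'address', 'personal_info'}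
--
-- def anonymize_resume_data(resume_data):
--     """Anonymize resume data by removing PII as per Data Minimization Policy"""
--     if not resume_data or not isinstance(resume_data, dict):
--         return resume_data
--     return {k: v for k, v in resume_data.items() if k not in PII_FIELDS}
-- ===== Notes on version B (the rewrite author's own statement) =====
-- stated objective: simpler
-- what changed: Instead of copying the dict and looping over a fixed removal list with membership-checked deletes, B builds the result in one dict comprehension over the data's own items, keeping keys outside a PII set.
import Mathlib
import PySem

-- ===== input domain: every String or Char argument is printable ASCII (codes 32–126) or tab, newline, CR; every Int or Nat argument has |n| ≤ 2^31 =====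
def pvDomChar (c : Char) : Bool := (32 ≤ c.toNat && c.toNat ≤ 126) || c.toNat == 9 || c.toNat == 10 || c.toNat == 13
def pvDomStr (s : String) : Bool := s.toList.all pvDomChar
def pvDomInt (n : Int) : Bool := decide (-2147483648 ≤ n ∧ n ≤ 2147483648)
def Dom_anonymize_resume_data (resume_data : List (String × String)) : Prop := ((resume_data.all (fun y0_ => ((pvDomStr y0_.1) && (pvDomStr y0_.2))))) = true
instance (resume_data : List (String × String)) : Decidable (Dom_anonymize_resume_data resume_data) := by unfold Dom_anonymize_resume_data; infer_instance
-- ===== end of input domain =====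

-- B removes the PII keys with one filtering pass over the data's own items instead of
-- copying the dict and deleting from it field by field (objective: simpler).

-- ===== PORT A =====
-- copy the dict, then for each PII field delete it if present, return the result
def anonymize_resume_data (resume_data : List (String × String)) : List (String × String) :=
  if resume_data.isEmpty then resume_data
  else
    let anonymized : PySem.Dict String String := PySem.Dict.mk resume_data
    let pii_fields : List String := ["name", "email", "phone", "address", "personal_info"]
    let final := pii_fields.foldl
      (fun d field => if d.contains field then d.erase field else d) anonymized
    final.items

-- ===== PORT B =====
def pvPiiSet : PySem.Set String :=
  PySem.Set.ofList ["name", "email", "phone", "address", "personal_info"]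

-- keep exactly the items whose key is not in the PII set
def anonymize_resume_data_alt (resume_data : List (String × String)) : List (String × String) :=
  if resume_data.isEmpty then resume_data
  else resume_data.filter (fun p => !(pvPiiSet.contains p.1))

-- ===== PRECONDITION & SPEC =====
def Spec_anonymize_resume_data (resume_data : List (String × String)) (out : List (String × String)) : Prop := out = anonymize_resume_data_alt resume_data
instance (resume_data : List (String × String)) (out : List (String × String)) : Decidable (Spec_anonymize_resume_data resume_data out) := by unfold Spec_anonymize_resume_data; infer_instance

-- ===== CLAIM (what is proved, stated in full; the proofs are below) =====
def Claim_equal_anonymize_resume_data : Prop := ∀ (resume_data : List (String × String)), Dom_anonymize_resume_data resume_data → Spec_anonymize_resume_data resume_data (anonymize_resume_data resume_data)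

-- ===== LEMMAS AND PROOFS =====

-- the membership-guarded delete is extensionally just an erase: erasing an absent key is a no-op
theorem pv_step_eq (d : PySem.Dict String String) (f : String) :
    (if d.contains f then d.erase f else d) = d.erase f := by
  split
  · rfl
  · next h =>
    apply PySem.Dict.ext
    simp only [PySem.Dict.erase]
    rw [eq_comm, List.filter_eq_self]
    intro p hp
    simp only [Bool.not_eq_eq_eq_not, Bool.not_true, beq_eq_false_iff_ne, ne_eq]
    intro hpf
    exact h (by
      rw [PySem.Dict.contains_iff_mem_keys]
      exact hpf ▸ PySem.Dict.mem_keys_of_mem_items d hp)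

-- ===== VERDICT (by name: the statement is the Claim_ definition above) =====
theorem anonymize_resume_data_spec : Claim_equal_anonymize_resume_data := by
  intro xs _
  unfold Spec_anonymize_resume_data anonymize_resume_data anonymize_resume_data_alt
  by_cases h : xs.isEmpty
  · simp [h]
  · simp only [h]
    simp only [List.foldl_cons, List.foldl_nil, pv_step_eq]
    simp only [PySem.Dict.erase, PySem.Dict.items, List.filter_filter, pvPiiSet,
      PySem.Set.ofList, PySem.Set.contains]
    apply List.filter_congr
    intro p _
    by_cases h1 : p.1 = "name" <;> by_cases h2 : p.1 = "email" <;> by_cases h3 : p.1 = "phone" <;>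
      by_cases h4 : p.1 = "address" <;> by_cases h5 : p.1 = "personal_info" <;>
      simp_all [List.contains_eq_mem]
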